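-- pv_equiv track=rewrite | github.com/anyl92/ALGORITHM | programmers/201008_code_challenge.py | solution
-- ===== SOURCE A (Python) =====
-- def solution(s):
--     answer = 0
--     s_list = list(s)
--     sub_list = []
--     for i in range(len(s_list)+1):
--         for j in range(i+1, len(s_list)+1):
--             sub_list.append(s_list[i:j])
--
--     for p in sub_list:
--         start = 0
--         end = len(p) - 1
--         cur = 0
--         while end > 0 and start < len(p):
--             if p[start] != p[end]:
--                 if end - start > cur:
--                     cur = end - start
--                 start += 1
--                 end = len(p) - 1
--                 continue
--             end -= 1
--         answer += cur
--
--     return answer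
-- ===== SOURCE B (Python) =====
-- def _last_ne(p, c):
--     # index of the last character of p differing from c, or -1
--     last = -1
--     for k in range(len(p)):
--         if p[k] != c:
--             last = k
--     return last
--
--
-- def _first_ne(p, c):
--     # index of the first character of p differing from c, or -1
--     first = -1
--     for k in reversed(range(len(p))):
--         if p[k] != c:
--             first = k
--     return first
--
--
-- def solution(s):
--     # For each substring p the max distance |between| two unequal characters is
--     # max(last index differing from p[0], (len-1) - first index differing from p[-1]);
--     # compute that closed form from two linear scans instead of A's resetting two-pointer loop.
--     total = 0
--     n = len(s)
--     for i in range(n):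
--         for j in range(i + 1, n + 1):
--             p = s[i:j]
--             m = j - i
--             last = _last_ne(p, p[0])
--             if last != -1:
--                 first = _first_ne(p, p[m - 1])
--                 total += max(last, (m - 1) - first)
--     return total
-- ===== Notes on version B (the rewrite author's own statement) =====
-- stated objective: faster
-- what changed: B drops A's materialized list of all substrings and A's resetting two-pointer while-loop (which rescans from the right end after every mismatch), computing each substring's max unequal-char span in closed form as max(last index differing from p[0], (len-1) - first index differing from p[-1]) from one forward and one backward linear scan.
import Mathlib
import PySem

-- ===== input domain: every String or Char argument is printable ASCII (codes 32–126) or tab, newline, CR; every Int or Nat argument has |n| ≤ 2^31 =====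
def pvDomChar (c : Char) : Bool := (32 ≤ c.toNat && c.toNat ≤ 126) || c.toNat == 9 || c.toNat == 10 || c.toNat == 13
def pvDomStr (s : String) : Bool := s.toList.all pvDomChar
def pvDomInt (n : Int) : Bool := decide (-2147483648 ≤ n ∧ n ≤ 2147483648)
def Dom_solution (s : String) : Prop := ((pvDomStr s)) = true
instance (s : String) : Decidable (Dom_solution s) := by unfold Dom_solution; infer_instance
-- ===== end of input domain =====

-- B replaces A's per-substring resetting two-pointer while-loop (and the materialized list of all
-- substrings) by a closed form from one forward and one backward scan per substring: alternative
-- algorithm, measured faster in a timing run (O(n^3) scans vs A's O(n^4) rescanning).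

-- ===== PORT A =====
-- A's inner 'while end > 0 and start < len(p)' loop. Python's 'end' is an int that is only ever
-- -1 (empty p, loop never entered) or ≥ 0, and indices are in range whenever accessed, so Nat
-- state with List.getD is exact; 'end - start > cur' is computed in Int as Python does.
def loopA (p : List Char) (start endi : Nat) (cur : Int) : Int :=
  if h : 0 < endi ∧ start < p.length then
    if p.getD start 'A' ≠ p.getD endi 'A' then
      loopA p (start+1) (p.length - 1)
        (if (endi : Int) - (start : Int) > cur then (endi : Int) - (start : Int) else cur)
    else
      loopA p start (endi - 1) cur
  else cur
termination_by (p.length - start, endi)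
decreasing_by
  · apply Prod.Lex.left; omega
  · apply Prod.Lex.right; omega

def solution (s : String) : Int :=
  let s_list := s.toList
  let sub_list := (PySem.List.pyRange 0 ((s_list.length : Int) + 1) 1).foldl
    (fun acc i => (PySem.List.pyRange (i + 1) ((s_list.length : Int) + 1) 1).foldl
      (fun acc2 j => acc2 ++ [PySem.List.slice s_list (some i) (some j)]) acc) []
  sub_list.foldl (fun answer p => answer + loopA p 0 (p.length - 1) 0) 0

-- ===== PORT B =====
def lastNe (p : List Char) (c : Char) : Int :=
  (List.range p.length).foldl (fun last k => if p.getD k 'A' ≠ c then (k : Int) else last) (-1)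

def firstNe (p : List Char) (c : Char) : Int :=
  ((List.range p.length).reverse).foldl (fun first k => if p.getD k 'A' ≠ c then (k : Int) else first) (-1)

def solution_alt (s : String) : Int :=
  let cs := s.toList
  let n := cs.length
  (List.range n).foldl (fun total i =>
    (List.range' (i + 1) (n - i)).foldl (fun total j =>
      let p := (cs.drop i).take (j - i)
      let m := j - i
      let last := lastNe p (p.getD 0 'A')
      if last ≠ -1 then
        let first := firstNe p (p.getD (m - 1) 'A')
        total + max last ((m : Int) - 1 - first)
      else total) total) 0

-- ===== PRECONDITION & SPEC =====
def Spec_solution (s : String) (out : Int) : Prop := out = solution_alt s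
instance (s : String) (out : Int) : Decidable (Spec_solution s out) := by unfold Spec_solution; infer_instance

-- ===== CLAIM (what is proved, stated in full; the proofs are below) =====
def Claim_equal_solution : Prop := ∀ (s : String), Dom_solution s → Spec_solution s (solution s)

-- ===== LEMMAS AND PROOFS =====

-- the downward scan of A's inner while, as a function: largest e in [1, eMax] with p[e] ≠ p[s]
def bestEnd (p : List Char) (s : Nat) : Nat → Option Nat
  | 0 => none
  | e + 1 => if p.getD (e+1) 'A' ≠ p.getD s 'A' then some (e+1) else bestEnd p s e

theorem bestEnd_none (p : List Char) (s : Nat) :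
    ∀ e, bestEnd p s e = none ↔ ∀ m, 1 ≤ m → m ≤ e → p.getD m 'A' = p.getD s 'A' := by
  intro e
  induction e with
  | zero => simp [bestEnd]; omega
  | succ e ih =>
    simp only [bestEnd]
    split
    · rename_i h
      constructor
      · intro hc; cases hc
      · intro hall; exact absurd (hall (e+1) (by omega) le_rfl) h
    · rename_i h
      push_neg at h
      rw [ih]
      constructor
      · intro hall m h1 h2
        rcases Nat.lt_or_ge m (e+1) with hm | hm
        · exact hall m h1 (by omega)
        · have : m = e + 1 := by omega
          rw [this]; exact h
      · intro hall m h1 h2; exact hall m h1 (by omega)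

theorem bestEnd_some (p : List Char) (s : Nat) :
    ∀ e m, bestEnd p s e = some m →
      1 ≤ m ∧ m ≤ e ∧ p.getD m 'A' ≠ p.getD s 'A' ∧
      ∀ k, m < k → k ≤ e → p.getD k 'A' = p.getD s 'A' := by
  intro e
  induction e with
  | zero => intro m h; simp [bestEnd] at h
  | succ e ih =>
    intro m h
    simp only [bestEnd] at h
    split at h
    · rename_i hne
      cases h
      exact ⟨by omega, le_rfl, hne, fun k hk1 hk2 => by omega⟩
    · rename_i heq
      push_neg at heq
      obtain ⟨h1, h2, h3, h4⟩ := ih m h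
      refine ⟨h1, by omega, h3, fun k hk1 hk2 => ?_⟩
      rcases Nat.lt_or_ge k (e+1) with hk | hk
      · exact h4 k hk1 (by omega)
      · have : k = e + 1 := by omega
        rw [this]; exact heq

-- SCAN: one pass of A's while loop at a fixed start = find the best end, then restart
theorem loopA_scan (p : List Char) (s : Nat) (hs : s < p.length) :
    ∀ e cur, loopA p s e cur =
      match bestEnd p s e with
      | none => cur
      | some m => loopA p (s+1) (p.length - 1)
          (if (m : Int) - (s : Int) > cur then (m : Int) - (s : Int) else cur) := by
  intro e
  induction e with
  | zero => intro cur; rw [loopA]; simp [bestEnd]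
  | succ e ih =>
    intro cur
    rw [loopA]
    simp only [bestEnd]
    have hd : 0 < e + 1 ∧ s < p.length := ⟨Nat.succ_pos e, hs⟩
    rw [dif_pos hd]
    by_cases hne : p.getD (e+1) 'A' = p.getD s 'A'
    · rw [if_neg (by simp only [ne_eq, not_not]; exact hne.symm), if_neg (by simp only [ne_eq, not_not]; exact hne), Nat.add_sub_cancel]
      exact ih cur
    · rw [if_pos (Ne.symm hne), if_pos hne]

theorem loopA_stop (p : List Char) (s endi : Nat) (cur : Int) (h : p.length ≤ s) :
    loopA p s endi cur = cur := by
  rw [loopA, dif_neg]; omega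

theorem le_loopA (p : List Char) :
    ∀ k s e : Nat, ∀ cur : Int, p.length - s ≤ k → cur ≤ loopA p s e cur := by
  intro k
  induction k with
  | zero =>
    intro s e cur hk
    rw [loopA_stop p s e cur (by omega)]
  | succ k ih =>
    intro s e cur hk
    rcases Nat.lt_or_ge s p.length with hs | hs
    · rw [loopA_scan p s hs e cur]
      cases hbe : bestEnd p s e with
      | none => exact le_rfl
      | some m =>
        have h1 : cur ≤ (if (m : Int) - (s : Int) > cur then (m : Int) - (s : Int) else cur) := by
          split <;> omega
        exact le_trans h1 (ih (s+1) (p.length - 1) _ (by omega))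
    · rw [loopA_stop p s e cur hs]

theorem loopA_le (p : List Char) (T : Int)
    (H : ∀ s e : Nat, s < p.length → 1 ≤ e → e + 1 ≤ p.length →
      p.getD e 'A' ≠ p.getD s 'A' → (e : Int) - (s : Int) ≤ T) :
    ∀ k s e : Nat, ∀ cur : Int, p.length - s ≤ k → e + 1 ≤ p.length → cur ≤ T →
      loopA p s e cur ≤ T := by
  intro k
  induction k with
  | zero =>
    intro s e cur hk he hcur
    rw [loopA_stop p s e cur (by omega)]; exact hcur
  | succ k ih =>
    intro s e cur hk he hcur
    rcases Nat.lt_or_ge s p.length with hs | hs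
    · rw [loopA_scan p s hs e cur]
      cases hbe : bestEnd p s e with
      | none => exact hcur
      | some m =>
        obtain ⟨hm1, hm2, hm3, _⟩ := bestEnd_some p s e m hbe
        have hcur' : (if (m : Int) - (s : Int) > cur then (m : Int) - (s : Int) else cur) ≤ T := by
          have := H s m hs hm1 (by omega) hm3
          split <;> omega
        exact ih (s+1) (p.length - 1) _ (by omega) (by omega) hcur'
    · rw [loopA_stop p s e cur hs]; exact hcur

-- the step at start = i0: the scan finds end = length-1 and records (length-1) - i0
theorem loopA_reach_at (p : List Char) (i0 : Nat) (h2 : 2 ≤ p.length) (hi : i0 + 1 ≤ p.length)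
    (hne : p.getD i0 'A' ≠ p.getD (p.length - 1) 'A') (cur : Int) :
    (p.length : Int) - 1 - (i0 : Int) ≤ loopA p i0 (p.length - 1) cur := by
  have hs : i0 < p.length := by omega
  rw [loopA_scan p i0 hs (p.length - 1) cur]
  cases hbe : bestEnd p i0 (p.length - 1) with
  | none =>
    rw [bestEnd_none] at hbe
    exact absurd (hbe (p.length - 1) (by omega) le_rfl) (Ne.symm hne)
  | some m =>
    obtain ⟨hm1, hm2, hm3, hm4⟩ := bestEnd_some p i0 (p.length - 1) m hbe
    have hm : m = p.length - 1 := by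
      rcases Nat.lt_or_ge m (p.length - 1) with hlt | hge
      · exact absurd (hm4 (p.length - 1) hlt le_rfl) (Ne.symm hne)
      · omega
    subst hm
    have hcur' : (p.length : Int) - 1 - (i0 : Int) ≤
        (if ((p.length - 1 : Nat) : Int) - (i0 : Int) > cur
         then ((p.length - 1 : Nat) : Int) - (i0 : Int) else cur) := by
      have : ((p.length - 1 : Nat) : Int) = (p.length : Int) - 1 := by omega
      rw [this]; split <;> omega
    exact le_trans hcur' (le_loopA p p.length (i0+1) (p.length - 1) _ (by omega))

theorem loopA_reach (p : List Char) (i0 : Nat) (h2 : 2 ≤ p.length) (hi : i0 + 1 ≤ p.length)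
    (hne : p.getD i0 'A' ≠ p.getD (p.length - 1) 'A')
    (hfirst : ∀ k, k < i0 → p.getD k 'A' = p.getD (p.length - 1) 'A') :
    ∀ k s : Nat, ∀ cur : Int, i0 - s ≤ k → s ≤ i0 →
      (p.length : Int) - 1 - (i0 : Int) ≤ loopA p s (p.length - 1) cur := by
  intro k
  induction k with
  | zero =>
    intro s cur hk hsi
    have : s = i0 := by omega
    subst this
    exact loopA_reach_at p s h2 hi hne cur
  | succ k ih =>
    intro s cur hk hsi
    rcases Nat.eq_or_lt_of_le hsi with heq | hlt
    · subst heq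
      exact loopA_reach_at p s h2 hi hne cur
    · have hs : s < p.length := by omega
      rw [loopA_scan p s hs (p.length - 1) cur]
      cases hbe : bestEnd p s (p.length - 1) with
      | none =>
        rw [bestEnd_none] at hbe
        have h1 := hbe i0 (by omega) (by omega)
        rw [hfirst s hlt] at h1
        exact absurd h1 hne
      | some m =>
        exact ih (s+1) _ (by omega) (by omega)

theorem loopA_reach0 (p : List Char) (l0 : Nat) (h1 : 1 ≤ l0) (hl : l0 + 1 ≤ p.length)
    (hne : p.getD l0 'A' ≠ p.getD 0 'A')
    (hlast : ∀ k, l0 < k → k < p.length → p.getD k 'A' = p.getD 0 'A') :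
    (l0 : Int) ≤ loopA p 0 (p.length - 1) 0 := by
  have hs : 0 < p.length := by omega
  rw [loopA_scan p 0 hs (p.length - 1) 0]
  cases hbe : bestEnd p 0 (p.length - 1) with
  | none =>
    rw [bestEnd_none] at hbe
    exact absurd (hbe l0 h1 (by omega)) hne
  | some m =>
    obtain ⟨hm1, hm2, hm3, hm4⟩ := bestEnd_some p 0 (p.length - 1) m hbe
    have hm : m = l0 := by
      rcases Nat.lt_trichotomy m l0 with h | h | h
      · exact absurd (hm4 l0 h (by omega)) hne
      · exact h
      · exact absurd (hlast m h (by omega)) hm3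
    refine le_trans ?_ (le_loopA p p.length 1 (p.length - 1) _ (by omega))
    split <;> push_cast <;> omega

theorem loopA_allEq (p : List Char) (hp : 0 < p.length)
    (h : ∀ k, k < p.length → p.getD k 'A' = p.getD 0 'A') :
    loopA p 0 (p.length - 1) 0 = 0 := by
  rw [loopA_scan p 0 hp (p.length - 1) 0]
  have : bestEnd p 0 (p.length - 1) = none := by
    rw [bestEnd_none]
    intro m h1m hm
    exact h m (by omega)
  rw [this]

theorem last_fold_spec (p : List Char) (c : Char) :
    ∀ n : Nat,
      ((List.range n).foldl (fun last k => if p.getD k 'A' ≠ c then (k : Int) else last) (-1) = -1 ∧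
        ∀ k, k < n → p.getD k 'A' = c) ∨
      (∃ l : Nat,
        (List.range n).foldl (fun last k => if p.getD k 'A' ≠ c then (k : Int) else last) (-1) = (l : Int) ∧
        l < n ∧ p.getD l 'A' ≠ c ∧ ∀ k, l < k → k < n → p.getD k 'A' = c) := by
  intro n
  induction n with
  | zero => left; refine ⟨by simp, ?_⟩; omega
  | succ n ih =>
    rw [List.range_succ, List.foldl_append]
    simp only [List.foldl_cons, List.foldl_nil]
    by_cases hc : p.getD n 'A' = c
    · rw [if_neg (by simp only [ne_eq, not_not]; exact hc)]
      rcases ih with ⟨h1, h2⟩ | ⟨l, h1, h2, h3, h4⟩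
      · left
        refine ⟨h1, fun k hk => ?_⟩
        rcases Nat.lt_or_ge k n with h | h
        · exact h2 k h
        · have : k = n := by omega
          rw [this]; exact hc
      · right
        refine ⟨l, h1, by omega, h3, fun k hk1 hk2 => ?_⟩
        rcases Nat.lt_or_ge k n with h | h
        · exact h4 k hk1 h
        · have : k = n := by omega
          rw [this]; exact hc
    · rw [if_pos hc]
      right
      exact ⟨n, rfl, by omega, hc, fun k hk1 hk2 => by omega⟩

theorem first_fold_spec (p : List Char) (c : Char) :
    ∀ n : Nat, ∀ a : Int,
      (((List.range n).reverse).foldl (fun first k => if p.getD k 'A' ≠ c then (k : Int) else first) a = a ∧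
        ∀ k, k < n → p.getD k 'A' = c) ∨
      (∃ f0 : Nat,
        ((List.range n).reverse).foldl (fun first k => if p.getD k 'A' ≠ c then (k : Int) else first) a = (f0 : Int) ∧
        f0 < n ∧ p.getD f0 'A' ≠ c ∧ ∀ k, k < f0 → p.getD k 'A' = c) := by
  intro n
  induction n with
  | zero => intro a; left; refine ⟨by simp, ?_⟩; omega
  | succ n ih =>
    intro a
    have hrev : (List.range (n+1)).reverse = n :: (List.range n).reverse := by
      rw [List.range_succ, List.reverse_append]; simp
    rw [hrev, List.foldl_cons]
    by_cases hc : p.getD n 'A' = c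
    · rw [if_neg (by simp only [ne_eq, not_not]; exact hc)]
      rcases ih a with ⟨h1, h2⟩ | ⟨f0, h1, h2, h3, h4⟩
      · left
        refine ⟨h1, fun k hk => ?_⟩
        rcases Nat.lt_or_ge k n with h | h
        · exact h2 k h
        · have : k = n := by omega
          rw [this]; exact hc
      · right
        exact ⟨f0, h1, by omega, h3, h4⟩
    · rw [if_pos hc]
      rcases ih (n : Int) with ⟨h1, h2⟩ | ⟨f0, h1, h2, h3, h4⟩
      · right
        exact ⟨n, h1, by omega, hc, h2⟩
      · right
        exact ⟨f0, h1, by omega, h3, h4⟩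

theorem perSub (p : List Char) (hp : p ≠ []) :
    loopA p 0 (p.length - 1) 0 =
      (if lastNe p (p.getD 0 'A') ≠ -1
       then max (lastNe p (p.getD 0 'A'))
                ((p.length : Int) - 1 - firstNe p (p.getD (p.length - 1) 'A'))
       else 0) := by
  have hlen : 0 < p.length := by
    cases p with
    | nil => exact absurd rfl hp
    | cons a l => simp
  rcases last_fold_spec p (p.getD 0 'A') p.length with ⟨h1, h2⟩ | ⟨l0, h1, h2, h3, h4⟩
  · rw [loopA_allEq p hlen h2, if_neg (by simp only [lastNe, h1, ne_eq, not_not])]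
  · have hl1 : 1 ≤ l0 := by
      rcases Nat.eq_zero_or_pos l0 with h | h
      · subst h; exact absurd rfl h3
      · exact h
    have h2' : 2 ≤ p.length := by omega
    rcases first_fold_spec p (p.getD (p.length - 1) 'A') p.length (-1) with ⟨g1, g2⟩ | ⟨f0, g1, g2, g3, g4⟩
    · exact absurd ((g2 l0 h2).trans (g2 0 (by omega)).symm) h3
    · have hf0 : f0 + 1 ≤ p.length := by omega
      have hL : lastNe p (p.getD 0 'A') = (l0 : Int) := h1
      have hF : firstNe p (p.getD (p.length - 1) 'A') = (f0 : Int) := g1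
      rw [hL, hF, if_pos (by omega : (l0 : Int) ≠ -1)]
      apply le_antisymm
      · apply loopA_le p _ ?_ p.length 0 (p.length - 1) 0 (by omega) (by omega)
          (le_trans (by omega : (0:Int) ≤ (l0:Int)) (le_max_left _ _))
        intro s e hs he1 he2 hnese
        by_cases hec : p.getD e 'A' = p.getD 0 'A'
        · have hsc : p.getD s 'A' ≠ p.getD 0 'A' := fun h => hnese (hec.trans h.symm)
          by_cases hscl : p.getD s 'A' = p.getD (p.length - 1) 'A'
          · have hcl : p.getD (p.length - 1) 'A' ≠ p.getD 0 'A' := fun h => hsc (hscl.trans h)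
            have hll : p.length - 1 ≤ l0 := by
              by_contra hcon
              exact hcl (h4 (p.length - 1) (by omega) (by omega))
            refine le_trans (by omega : (e:Int) - (s:Int) ≤ (l0:Int)) (le_max_left _ _)
          · have hfs : f0 ≤ s := by
              by_contra hcon
              exact hscl (g4 s (by omega))
            refine le_trans (by omega : (e:Int) - (s:Int) ≤ (p.length:Int) - 1 - (f0:Int))
              (le_max_right _ _)
        · have hel : e ≤ l0 := by
            by_contra hcon
            exact hec (h4 e (by omega) (by omega))
          refine le_trans (by omega : (e:Int) - (s:Int) ≤ (l0:Int)) (le_max_left _ _)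
      · apply max_le
        · exact loopA_reach0 p l0 hl1 (by omega) h3 h4
        · exact loopA_reach p f0 h2' hf0 g3 g4 p.length 0 0 (by omega) (by omega)

-- the common normal form both programs are reduced to
def pvSum (cs : List Char) : Int :=
  ((List.range cs.length).map (fun i =>
    ((List.range (cs.length - i)).map (fun k =>
      loopA ((cs.drop i).take (k + 1)) 0 (((cs.drop i).take (k + 1)).length - 1) 0)).sum)).sum

theorem sum_map_flatMap {α β : Type} (l : List α) (h : α → List β) (f : β → Int) :
    ((l.flatMap h).map f).sum = (l.map (fun x => ((h x).map f).sum)).sum := by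
  induction l with
  | nil => rfl
  | cons a l ih =>
    rw [List.flatMap_cons, List.map_append, List.sum_append, List.map_cons, List.sum_cons, ih]

theorem pyRange_zero_cast (n : Nat) :
    PySem.List.pyRange 0 (n : Int) 1 = (List.range n).map (fun k : Nat => (k : Int)) := by
  rw [PySem.List.pyRange_one]
  rw [show ((n : Int) - 0).toNat = n by omega]
  exact List.map_congr_left (fun k _ => by simp)

theorem pyRange_add_cast (a : Int) (n : Nat) :
    PySem.List.pyRange a (a + (n : Int)) 1 = (List.range n).map (fun k : Nat => a + (k : Int)) := by
  rw [PySem.List.pyRange_one]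
  rw [show (a + (n : Int) - a).toNat = n by omega]

theorem solutionA_eq_pvSum (s : String) : solution s = pvSum s.toList := by
  unfold solution
  simp only [PySem.List.foldl_append_singleton_eq_map, PySem.List.foldl_append_eq_flatMap,
    List.nil_append]
  rw [PySem.List.foldl_add (g := fun p => loopA p 0 (p.length - 1) 0), zero_add]
  rw [sum_map_flatMap]
  rw [PySem.List.pyRange_one_succ_right (by positivity : (0:Int) ≤ (s.toList.length : Int))]
  rw [List.map_append, List.sum_append]
  have htail : (List.map (fun x =>
      (List.map (fun p => loopA p 0 (p.length - 1) 0)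
        (List.map (fun j => PySem.List.slice s.toList (some x) (some j))
          (PySem.List.pyRange (x + 1) ((s.toList.length : Int) + 1) 1))).sum)
      [(s.toList.length : Int)]).sum = 0 := by
    simp only [List.map_cons, List.map_nil, List.sum_cons, List.sum_nil]
    rw [PySem.List.pyRange_one_eq_nil le_rfl]
    simp
  rw [htail, add_zero, pyRange_zero_cast, List.map_map]
  unfold pvSum
  apply congrArg List.sum
  apply List.map_congr_left
  intro i hi
  rw [List.mem_range] at hi
  simp only [Function.comp_apply]
  rw [show ((s.toList.length : Int) + 1) = ((i : Int) + 1) + ((s.toList.length - i : Nat) : Int) by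
    omega]
  rw [pyRange_add_cast, List.map_map, List.map_map]
  apply congrArg List.sum
  apply List.map_congr_left
  intro k hk
  rw [List.mem_range] at hk
  simp only [Function.comp_apply]
  rw [show ((i : Int) + 1 + (k : Int)) = ((i + (k + 1) : Nat) : Int) by push_cast; ring]
  rw [PySem.List.slice_natCast]
  rw [show i + (k + 1) - i = k + 1 by omega]

theorem inner_fold_B (cs : List Char) (i : Nat) :
    ∀ (l : List Nat) (t : Int),
      l.foldl (fun total j =>
        let p := (cs.drop i).take (j - i)
        let m := j - i
        let last := lastNe p (p.getD 0 'A')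
        if last ≠ -1 then
          let first := firstNe p (p.getD (m - 1) 'A')
          total + max last ((m : Int) - 1 - first)
        else total) t
      = t + (l.map (fun j =>
          if lastNe ((cs.drop i).take (j - i)) (((cs.drop i).take (j - i)).getD 0 'A') ≠ -1 then
            max (lastNe ((cs.drop i).take (j - i)) (((cs.drop i).take (j - i)).getD 0 'A'))
              (((j - i : Nat) : Int) - 1 -
                firstNe ((cs.drop i).take (j - i)) (((cs.drop i).take (j - i)).getD (j - i - 1) 'A'))
          else 0)).sum := by
  intro l
  induction l with
  | nil => intro t; simp
  | cons a l ih =>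
    intro t
    rw [List.foldl_cons, ih, List.map_cons, List.sum_cons]
    dsimp only
    split <;> ring

theorem solutionB_eq_pvSum (s : String) : solution_alt s = pvSum s.toList := by
  unfold solution_alt
  simp only [inner_fold_B]
  rw [PySem.List.foldl_add (g := fun i =>
    (List.map (fun j =>
        if lastNe ((s.toList.drop i).take (j - i)) (((s.toList.drop i).take (j - i)).getD 0 'A') ≠ -1 then
          max (lastNe ((s.toList.drop i).take (j - i)) (((s.toList.drop i).take (j - i)).getD 0 'A'))
            (((j - i : Nat) : Int) - 1 -
              firstNe ((s.toList.drop i).take (j - i)) (((s.toList.drop i).take (j - i)).getD (j - i - 1) 'A'))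
        else 0)
      (List.range' (i + 1) (s.toList.length - i))).sum), zero_add]
  unfold pvSum
  apply congrArg List.sum
  apply List.map_congr_left
  intro i hi
  rw [List.mem_range] at hi
  rw [List.range'_eq_map_range, List.map_map]
  apply congrArg List.sum
  apply List.map_congr_left
  intro k hk
  rw [List.mem_range] at hk
  simp only [Function.comp_apply]
  have hji : i + 1 + k - i = k + 1 := by omega
  rw [hji]
  have hne : (s.toList.drop i).take (k + 1) ≠ [] := by
    have : ((s.toList.drop i).take (k + 1)).length = k + 1 := by
      rw [List.length_take, List.length_drop]; omega
    intro hcon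
    rw [hcon] at this
    simp at this
  have hplen : ((s.toList.drop i).take (k + 1)).length = k + 1 := by
    rw [List.length_take, List.length_drop]; omega
  rw [perSub _ hne, hplen]

theorem solution_eq_alt (s : String) : solution s = solution_alt s := by
  rw [solutionA_eq_pvSum, solutionB_eq_pvSum]

-- ===== VERDICT (by name: the statement is the Claim_ definition above) =====
theorem solution_spec : Claim_equal_solution := by
  intro s _
  unfold Spec_solution
  exact solution_eq_alt s
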